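-- pv_equiv track=rewrite | github.com/DDataAly/Python | 06_polynomial_differentiator/simple_differentiator.py | polynomial_parser
-- ===== SOURCE A (Python) =====
-- def bracket_counter(opens, closes, symbol):
--     if symbol=='(':
--         opens+=1
--     if symbol==')':
--         closes+=1
--     return opens, closes
--
-- def is_plus_or_minus(symbol):
--     return symbol in ['+', '-']
--
-- def polynomial_parser(input_string):
--     parsed_polynomial=[]
--     i=0
--     while i<len(input_string):
--         monomial=''
--         opens,closes=0,0
--         for symbol in input_string[i: len(input_string)]:
--             i+=1
--             opens, closes=bracket_counter(opens,closes, symbol)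
--             if all ([
--                 monomial,
--                 is_plus_or_minus(symbol),
--                 opens==closes
--                 ]):
--                     i=i-1
--                     break
--             else:
--                 monomial+=symbol
--         parsed_polynomial.append(monomial)
--     return parsed_polynomial
-- ===== SOURCE B (Python) =====
-- def polynomial_parser(input_string):
--     parsed_polynomial = []
--     cur = []
--     depth = 0
--     for ch in input_string:
--         if ch in '+-' and depth == 0 and cur:
--             parsed_polynomial.append(''.join(cur))
--             cur = [ch]
--         else:
--             if ch == '(':
--                 depth += 1
--             elif ch == ')':
--                 depth -= 1
--             cur.append(ch)
--     if cur:
--         parsed_polynomial.append(''.join(cur))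
--     return parsed_polynomial
-- ===== Notes on version B (the rewrite author's own statement) =====
-- stated objective: faster
-- what changed: Replaces A's nested loops (an outer while that re-slices the string and an inner for rebuilding per-monomial opens/closes counters) by a single pass over the characters with one bracket-depth counter and a current-monomial buffer.
import Mathlib
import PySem

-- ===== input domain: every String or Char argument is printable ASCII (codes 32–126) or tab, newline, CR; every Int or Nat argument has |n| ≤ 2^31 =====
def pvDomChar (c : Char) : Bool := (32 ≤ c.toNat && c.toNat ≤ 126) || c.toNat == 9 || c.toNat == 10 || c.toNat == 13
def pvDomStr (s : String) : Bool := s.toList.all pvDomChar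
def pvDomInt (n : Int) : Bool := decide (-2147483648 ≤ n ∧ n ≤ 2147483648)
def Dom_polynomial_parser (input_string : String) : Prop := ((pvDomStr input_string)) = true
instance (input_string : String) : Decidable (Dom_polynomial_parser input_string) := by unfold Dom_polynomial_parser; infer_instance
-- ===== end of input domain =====

-- B replaces A's nested loop with re-slicing (O(n^2)) by one pass with a bracket-depth
-- counter and a current-monomial buffer (O(n)); same return value on every string.

-- ===== PORT A =====
def bracket_counter (opens closes : Int) (symbol : Char) : Int × Int :=
  let opens := if symbol = '(' then opens + 1 else opens
  let closes := if symbol = ')' then closes + 1 else closes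
  (opens, closes)

def is_plus_or_minus (symbol : Char) : Bool :=
  symbol = '+' || symbol = '-'

-- the inner `for symbol in input_string[i:]` loop: returns the monomial built (A's
-- `i` advances by exactly the monomial's length, counting the `i=i-1` on break)
def pvInnerA (rest : List Char) (opens closes : Int) (monomial : List Char) : List Char :=
  match rest with
  | [] => monomial
  | symbol :: rest' =>
    let (opens, closes) := bracket_counter opens closes symbol
    if monomial ≠ [] ∧ is_plus_or_minus symbol = true ∧ opens = closes then
      monomial
    else
      pvInnerA rest' opens closes (monomial ++ [symbol])

theorem pvInnerA_len_ge (rest : List Char) (o c : Int) (m : List Char) :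
    m.length ≤ (pvInnerA rest o c m).length := by
  induction rest generalizing o c m with
  | nil => simp [pvInnerA]
  | cons s r ih =>
    simp only [pvInnerA]
    split
    · exact le_refl _
    · calc m.length ≤ (m ++ [s]).length := by simp
        _ ≤ _ := ih _ _ _

theorem pvInnerA_len_pos (cs : List Char) (h : cs ≠ []) :
    1 ≤ (pvInnerA cs 0 0 []).length := by
  obtain ⟨a, l, rfl⟩ := List.exists_cons_of_ne_nil h
  rw [pvInnerA]
  simp only [ne_eq, not_true_eq_false, false_and, if_false, List.nil_append]
  exact le_trans (by simp) (pvInnerA_len_ge l _ _ [a])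

-- A's outer `while i < len(input_string)` loop; input_string[i:len] is cs.drop i
-- (slice with bounds 0 ≤ i ≤ len, exact)
def pvOuterA (cs : List Char) (i : Nat) : List (List Char) :=
  if _h : i < cs.length then
    pvInnerA (cs.drop i) 0 0 [] :: pvOuterA cs (i + (pvInnerA (cs.drop i) 0 0 []).length)
  else []
termination_by cs.length - i
decreasing_by
  have h1 := pvInnerA_len_pos (cs.drop i) (by simp only [ne_eq, List.drop_eq_nil_iff]; omega)
  omega

def polynomial_parser (input_string : String) : List String :=
  (pvOuterA input_string.toList 0).map String.mk

-- ===== PORT B =====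
-- one step of B's `for ch in input_string` loop; state = (parsed_polynomial, cur, depth)
def pvAltStep (st : List String × List Char × Int) (ch : Char) : List String × List Char × Int :=
  match st with
  | (parsed, cur, depth) =>
    if (ch = '+' ∨ ch = '-') ∧ depth = 0 ∧ cur ≠ [] then
      (parsed ++ [String.mk cur], [ch], depth)
    else
      let depth := if ch = '(' then depth + 1 else if ch = ')' then depth - 1 else depth
      (parsed, cur ++ [ch], depth)

def polynomial_parser_alt (input_string : String) : List String :=
  match input_string.toList.foldl pvAltStep ([], [], 0) with
  | (parsed, cur, _) => if cur ≠ [] then parsed ++ [String.mk cur] else parsed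

-- ===== PRECONDITION & SPEC =====
def Spec_polynomial_parser (input_string : String) (out : List String) : Prop := out = polynomial_parser_alt input_string
instance (input_string : String) (out : List String) : Decidable (Spec_polynomial_parser input_string out) := by unfold Spec_polynomial_parser; infer_instance

-- ===== CLAIM (what is proved, stated in full; the proofs are below) =====
def Claim_equal_polynomial_parser : Prop := ∀ (input_string : String), Dom_polynomial_parser input_string → Spec_polynomial_parser input_string (polynomial_parser input_string)

-- ===== LEMMAS AND PROOFS =====

-- suffix form of A's outer loop
def pvOuterA' (cs : List Char) : List (List Char) :=
  if _h : cs ≠ [] then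
    pvInnerA cs 0 0 [] :: pvOuterA' (cs.drop (pvInnerA cs 0 0 []).length)
  else []
termination_by cs.length
decreasing_by
  have h1 := pvInnerA_len_pos cs _h
  have h2 : cs.length ≠ 0 := by simpa [List.length_eq_zero_iff] using _h
  simp only [List.length_drop]
  omega

theorem pvOuterA_eq_drop (cs : List Char) (i : Nat) :
    pvOuterA cs i = pvOuterA' (cs.drop i) := by
  rw [pvOuterA, pvOuterA']
  by_cases h : i < cs.length
  · have hne : cs.drop i ≠ [] := by simp only [ne_eq, List.drop_eq_nil_iff]; omega
    rw [dif_pos h, dif_pos hne]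
    have := pvOuterA_eq_drop cs (i + (pvInnerA (cs.drop i) 0 0 []).length)
    rw [this, List.drop_drop]
  · have hnil : cs.drop i = [] := by simp only [List.drop_eq_nil_iff]; omega
    rw [dif_neg h, dif_neg (by simp [hnil])]
termination_by cs.length - i
decreasing_by
  have h1 := pvInnerA_len_pos (cs.drop i) (by simp only [ne_eq, List.drop_eq_nil_iff]; omega)
  omega

theorem pvOuterA'_cons (ch : Char) (rest : List Char) :
    pvOuterA' (ch :: rest) =
      pvInnerA rest (if ch = '(' then (0:Int) + 1 else 0) (if ch = ')' then (0:Int) + 1 else 0) [ch] ::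
        pvOuterA' (rest.drop
          ((pvInnerA rest (if ch = '(' then (0:Int) + 1 else 0) (if ch = ')' then (0:Int) + 1 else 0) [ch]).length - 1)) := by
  rw [pvOuterA', dif_pos (by simp : (ch :: rest) ≠ [])]
  have hre : pvInnerA (ch :: rest) 0 0 [] =
      pvInnerA rest (if ch = '(' then (0:Int) + 1 else 0) (if ch = ')' then (0:Int) + 1 else 0) [ch] := by
    rw [pvInnerA]
    simp only [bracket_counter, ne_eq, not_true_eq_false, false_and, if_false, List.nil_append]
  rw [hre]
  have hlen : 1 ≤ (pvInnerA rest (if ch = '(' then (0:Int) + 1 else 0)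
      (if ch = ')' then (0:Int) + 1 else 0) [ch]).length :=
    le_trans (by simp) (pvInnerA_len_ge rest _ _ [ch])
  obtain ⟨k, hk⟩ : ∃ k, (pvInnerA rest (if ch = '(' then (0:Int) + 1 else 0)
      (if ch = ')' then (0:Int) + 1 else 0) [ch]).length = k + 1 :=
    ⟨_, (Nat.succ_pred_eq_of_pos hlen).symm⟩
  rw [hk]
  simp

def pvFinish (st : List String × List Char × Int) : List String :=
  match st with
  | (parsed, cur, _) => if cur ≠ [] then parsed ++ [String.mk cur] else parsed

-- main invariant: folding B's step starting mid-monomial (depth = opens - closes)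
-- equals A's inner loop followed by A's outer loop on the remainder
theorem pvMain (rest : List Char) (o c : Int) (cur : List Char) (parsed : List String)
    (hcur : cur ≠ []) :
    pvFinish (rest.foldl pvAltStep (parsed, cur, o - c)) =
      parsed ++ String.mk (pvInnerA rest o c cur) ::
        (pvOuterA' (rest.drop ((pvInnerA rest o c cur).length - cur.length))).map String.mk := by
  induction rest generalizing o c cur parsed with
  | nil =>
    simp [pvInnerA, pvFinish, pvOuterA', hcur]
  | cons ch rest' ih =>
    simp only [List.foldl_cons, pvInnerA, bracket_counter]
    by_cases hbr : cur ≠ [] ∧ is_plus_or_minus ch = true ∧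
        (if ch = '(' then o + 1 else o) = (if ch = ')' then c + 1 else c)
    · -- A breaks: ch is '+' or '-', so no bracket update, and o = c, i.e. depth 0
      obtain ⟨-, hpm, heq⟩ := hbr
      have hpm' : ch = '+' ∨ ch = '-' := by
        simp [is_plus_or_minus] at hpm; tauto
      have hnp : ch ≠ '(' := by rcases hpm' with h | h <;> simp [h]
      have hnc : ch ≠ ')' := by rcases hpm' with h | h <;> simp [h]
      rw [if_neg hnp, if_neg hnc] at heq
      have hd : o - c = 0 := by omega
      rw [if_pos (⟨hcur, hpm, by rw [if_neg hnp, if_neg hnc]; exact heq⟩ :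
        cur ≠ [] ∧ is_plus_or_minus ch = true ∧ _)]
      simp only [pvAltStep, if_pos (⟨hpm', hd, hcur⟩ : (ch = '+' ∨ ch = '-') ∧ o - c = 0 ∧ cur ≠ [])]
      rw [show (o - c) = ((0:Int) - 0) from by omega]
      rw [Nat.sub_self, List.drop_zero, pvOuterA'_cons ch rest']
      rw [if_neg hnp, if_neg hnc]
      rw [ih 0 0 [ch] (parsed ++ [String.mk cur]) (by simp)]
      simp
    · -- no break: B also keeps accumulating, with depth' = opens' - closes'
      rw [if_neg hbr]
      have hB : ¬ ((ch = '+' ∨ ch = '-') ∧ o - c = 0 ∧ cur ≠ []) := by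
        rintro ⟨hpm', hd, -⟩
        have hpm : is_plus_or_minus ch = true := by
          simp only [is_plus_or_minus, Bool.or_eq_true, decide_eq_true_eq]; exact hpm'
        have hnp : ch ≠ '(' := by rcases hpm' with h | h <;> simp [h]
        have hnc : ch ≠ ')' := by rcases hpm' with h | h <;> simp [h]
        exact hbr ⟨hcur, hpm, by rw [if_neg hnp, if_neg hnc]; omega⟩
      simp only [pvAltStep, if_neg hB]
      have hdep : (if ch = '(' then o - c + 1 else if ch = ')' then o - c - 1 else o - c) =
          (if ch = '(' then o + 1 else o) - (if ch = ')' then c + 1 else c) := by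
        by_cases h1 : ch = '(' <;> by_cases h2 : ch = ')' <;> simp_all <;> omega
      rw [hdep, ih _ _ (cur ++ [ch]) parsed (by simp)]
      have hlen2 : cur.length + 1 ≤
          (pvInnerA rest' (if ch = '(' then o + 1 else o) (if ch = ')' then c + 1 else c)
            (cur ++ [ch])).length := by
        have := pvInnerA_len_ge rest' (if ch = '(' then o + 1 else o)
          (if ch = ')' then c + 1 else c) (cur ++ [ch])
        simpa using this
      set L := (pvInnerA rest' (if ch = '(' then o + 1 else o) (if ch = ')' then c + 1 else c)
        (cur ++ [ch])).length with hL
      have hdrop : (ch :: rest').drop (L - cur.length) = rest'.drop (L - (cur ++ [ch]).length) := by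
        have : L - cur.length = (L - (cur ++ [ch]).length) + 1 := by
          simp only [List.length_append, List.length_cons, List.length_nil]; omega
        rw [this]; simp
      rw [hdrop]

theorem polynomial_parser_spec : Claim_equal_polynomial_parser := by
  intro s _
  unfold Spec_polynomial_parser polynomial_parser polynomial_parser_alt
  rw [pvOuterA_eq_drop, List.drop_zero]
  cases hcs : s.toList with
  | nil => rw [pvOuterA']; simp
  | cons ch rest =>
    show List.map String.mk (pvOuterA' (ch :: rest)) =
      pvFinish ((ch :: rest).foldl pvAltStep ([], [], 0))
    rw [List.foldl_cons]
    have hstep : pvAltStep ([], ([] : List Char), (0 : Int)) ch =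
        ([], [ch], (if ch = '(' then (0:Int) + 1 else 0) - (if ch = ')' then (0:Int) + 1 else 0)) := by
      simp only [pvAltStep, ne_eq, not_true_eq_false, and_false, if_false, List.nil_append]
      split_ifs <;> simp_all
    rw [hstep, pvMain rest _ _ [ch] [] (by simp), pvOuterA'_cons ch rest]
    simp
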